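-- pv_equiv track=rewrite | github.com/DancingOnAir/LeetcodePythonSolution | Stack/1130_minimum_cost_tree_from_leaf_values.py | mctFromLeafValues1
-- ===== SOURCE A (Python) =====
-- from typing import List
--
-- def mctFromLeafValues1(arr: List[int]) -> int:
--     res = 0
--     while len(arr) > 1:
--         idx = arr.index(min(arr))
--         if 0 < idx < len(arr) - 1:
--             res += min(arr[idx - 1], arr[idx + 1]) * arr[idx]
--         else:
--             res += (arr[1] if idx == 0 else arr[-2]) * arr[idx]
--         arr.pop(idx)
--     return res
-- ===== SOURCE B (Python) =====
-- from typing import List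
--
-- def mctFromLeafValues1(arr: List[int]) -> int:
--     # O(n) monotonic decreasing stack: each leaf is charged when its nearest
--     # greater neighbour appears; A's repeated remove-the-minimum loop is O(n^2).
--     res = 0
--     stack = []
--     for a in arr:
--         while stack and stack[-1] <= a:
--             mid = stack.pop()
--             if stack:
--                 res += mid * min(stack[-1], a)
--             else:
--                 res += mid * a
--         stack.append(a)
--     while len(stack) > 1:
--         res += stack.pop() * stack[-1]
--     return res
-- ===== Notes on version B (the rewrite author's own statement) =====
-- stated objective: faster
-- what changed: Replaced A's repeated scan-for-minimum-and-pop loop (each round rescans the whole list) by a single left-to-right pass with a monotonically decreasing stack that charges each leaf when its nearest greater neighbour arrives, plus a final stack drain; note A also empties the caller's list in place, B does not (return value equivalence only).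
import Mathlib
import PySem

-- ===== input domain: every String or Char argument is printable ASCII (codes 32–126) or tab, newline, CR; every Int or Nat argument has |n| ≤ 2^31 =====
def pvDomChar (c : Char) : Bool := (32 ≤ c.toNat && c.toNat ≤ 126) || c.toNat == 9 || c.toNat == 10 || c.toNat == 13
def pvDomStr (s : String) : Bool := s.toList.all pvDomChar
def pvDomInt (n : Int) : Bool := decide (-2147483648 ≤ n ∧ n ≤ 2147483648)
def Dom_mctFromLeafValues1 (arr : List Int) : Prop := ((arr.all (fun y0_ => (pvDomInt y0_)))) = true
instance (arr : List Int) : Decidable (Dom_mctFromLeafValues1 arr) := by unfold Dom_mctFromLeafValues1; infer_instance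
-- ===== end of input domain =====

-- B replaces A's O(n^2) repeated scan-for-minimum-and-pop loop by a single O(n) monotonic-stack
-- pass; A empties the caller's list in place (B does not): the equivalence proved is about the
-- return value only.

-- ===== PORT A =====
-- A's while loop: each round takes the current minimum's first index, charges it against the
-- cheaper neighbour, and pops it; ported as well-founded recursion on the list length.
def mctALoop (arr : List Int) (res : Int) : Int :=
  if 1 < arr.length then
    match PySem.List.min? arr (fun x => x) with
    | none => res  -- unreachable: arr ≠ []
    | some m =>
      match PySem.List.index? arr m with
      | none => res  -- unreachable: m ∈ arr
      | some idx =>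
        let charge : Int :=
          if 0 < idx ∧ (idx : Int) < (arr.length : Int) - 1 then
            min ((PySem.List.pyGet? arr ((idx : Int) - 1)).getD 0)
                ((PySem.List.pyGet? arr ((idx : Int) + 1)).getD 0) * m
          else
            (if idx = 0 then (PySem.List.pyGet? arr 1).getD 0
             else (PySem.List.pyGet? arr (-2)).getD 0) * m
        match hp : PySem.List.pop? arr (idx : Int) with
        | none => res  -- unreachable: idx < len
        | some (_, rest) => mctALoop rest (res + charge)
  else res
termination_by arr.length
decreasing_by
  have := PySem.List.length_of_pop?_eq_some _ hp
  simp only [] at this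
  omega

def mctFromLeafValues1 (arr : List Int) : Int := mctALoop arr 0

-- ===== PORT B =====
-- Source B's inner 'while stack and stack[-1] <= a' loop (stack head = Python stack[-1]):
def mctPopLoop (st : List Int) (a : Int) (res : Int) : Int × List Int :=
  match st with
  | [] => (res, [])
  | mid :: rest =>
    if mid ≤ a then
      mctPopLoop rest a (res + mid * (match rest with | [] => a | t :: _ => min t a))
    else (res, mid :: rest)

-- one iteration of Source B's 'for a in arr' body: run the while loop, then append a
def mctStep (s : Int × List Int) (a : Int) : Int × List Int :=
  (( mctPopLoop s.2 a s.1).1, a :: (mctPopLoop s.2 a s.1).2)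

-- Source B's final 'while len(stack) > 1' drain
def mctDrain (st : List Int) (res : Int) : Int :=
  match st with
  | x :: y :: rest => mctDrain (y :: rest) (res + x * y)
  | _ => res

def mctFromLeafValues1_alt (arr : List Int) : Int :=
  mctDrain (arr.foldl mctStep (0, [])).2 (arr.foldl mctStep (0, [])).1

-- ===== PRECONDITION & SPEC =====
def Spec_mctFromLeafValues1 (arr : List Int) (out : Int) : Prop := out = mctFromLeafValues1_alt arr
instance (arr : List Int) (out : Int) : Decidable (Spec_mctFromLeafValues1 arr out) := by unfold Spec_mctFromLeafValues1; infer_instance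

-- ===== CLAIM (what is proved, stated in full; the proofs are below) =====
def Claim_equal_mctFromLeafValues1 : Prop := ∀ (arr : List Int), Dom_mctFromLeafValues1 arr → Spec_mctFromLeafValues1 arr (mctFromLeafValues1 arr)

-- ===== LEMMAS AND PROOFS =====

-- the price A charges for removing minimum m from p ++ m :: s (p = left part, s = right part)
def mctCharge (p s : List Int) (m : Int) : Int :=
  match s, p.getLast? with
  | a' :: _, none => m * a'
  | a' :: _, some t => m * min t a'
  | [], some t => m * t
  | [], none => 0


-- unfold one round of A's while loop (hypotheses discharge the unreachable match arms)
theorem mctALoop_round (arr rest : List Int) (m x : Int) (idx : Nat) (r : Int)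
    (h : 1 < arr.length)
    (hm : PySem.List.min? arr (fun x => x) = some m)
    (hi : PySem.List.index? arr m = some idx)
    (hpp : PySem.List.pop? arr (idx : Int) = some (x, rest)) :
    mctALoop arr r = mctALoop rest (r +
      (if 0 < idx ∧ (idx : Int) < (arr.length : Int) - 1 then
         min ((PySem.List.pyGet? arr ((idx : Int) - 1)).getD 0)
             ((PySem.List.pyGet? arr ((idx : Int) + 1)).getD 0) * m
       else (if idx = 0 then (PySem.List.pyGet? arr 1).getD 0
             else (PySem.List.pyGet? arr (-2)).getD 0) * m)) := by
  rw [mctALoop]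
  simp only [h, if_true, hm, hi]
  split
  · rename_i heq; rw [hpp] at heq; cases heq
  · rename_i fst rest' heq; rw [hpp] at heq; injection heq with heq2
    injection heq2 with h1 h2; subst h2; rfl

theorem mctALoop_stop (arr : List Int) (r : Int) (h : ¬ 1 < arr.length) :
    mctALoop arr r = r := by
  rw [mctALoop]; simp [h]

-- B's inner while loop: the result is the res argument plus a pop total independent of res
theorem mctPopLoop_shift (st : List Int) (a : Int) : ∀ r : Int,
    mctPopLoop st a r = (r + (mctPopLoop st a 0).1, (mctPopLoop st a 0).2) := by
  induction st with
  | nil => intro r; simp [mctPopLoop]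
  | cons mid rest ih =>
    intro r
    by_cases hle : mid ≤ a
    · simp only [mctPopLoop, if_pos hle]
      rw [ih, ih (0 + _)]
      simp [add_comm, add_left_comm]
    · simp only [mctPopLoop, if_neg hle]; simp

-- the whole pass: res is an additive accumulator, the stack never depends on it
theorem mctFoldl_shift (l : List Int) : ∀ (r : Int) (st : List Int),
    l.foldl mctStep (r, st) = (r + (l.foldl mctStep (0, st)).1, (l.foldl mctStep (0, st)).2) := by
  induction l with
  | nil => intro r st; simp
  | cons a t ih =>
    intro r st
    have hstep : mctStep (r, st) a
        = (r + (mctStep (0, st) a).1, (mctStep (0, st) a).2) := by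
      show ((mctPopLoop st a r).1, a :: (mctPopLoop st a r).2) = _
      rw [mctPopLoop_shift st a r]
      rfl
    simp only [List.foldl_cons, hstep]
    rw [ih (r + (mctStep (0, st) a).1), ih (mctStep (0, st) a).1]
    rw [add_assoc]

theorem mctDrain_shift (st : List Int) : ∀ r : Int, mctDrain st r = r + mctDrain st 0 := by
  induction st with
  | nil => intro r; simp [mctDrain]
  | cons x t ih =>
    cases t with
    | nil => intro r; simp [mctDrain]
    | cons y rest =>
      intro r
      rw [mctDrain, mctDrain, ih (r + x * y), ih (0 + x * y)]
      ring

-- after processing a nonempty prefix, the stack top is the last element pushed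
theorem mctFoldl_snd_concat (p : List Int) (x : Int) (s : Int × List Int) :
    ∃ T, ((p ++ [x]).foldl mctStep s).2 = x :: T := by
  rw [List.foldl_append]
  exact ⟨(mctPopLoop (p.foldl mctStep s).2 x (p.foldl mctStep s).1).2, rfl⟩

-- popping m (≤ a) off the stack adds its charge; the rest of the while loop is unchanged
theorem mctPop_skip_nil (m a rp : Int) (hm : m ≤ a) :
    mctPopLoop [m] a rp = (rp + m * a, []) := by
  simp [mctPopLoop, hm]

theorem mctPop_skip_cons (t : Int) (T : List Int) (m a rp : Int) (hm : m ≤ a) :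
    mctPopLoop (m :: t :: T) a rp
      = ((mctPopLoop (t :: T) a rp).1 + m * min t a, (mctPopLoop (t :: T) a rp).2) := by
  have e : mctPopLoop (m :: t :: T) a rp
      = if m ≤ a then mctPopLoop (t :: T) a (rp + m * min t a) else (rp, m :: t :: T) := rfl
  rw [e, if_pos hm,
      mctPopLoop_shift (t :: T) a (rp + m * min t a), mctPopLoop_shift (t :: T) a rp]
  refine Prod.ext ?_ rfl
  simp only []
  ring

-- the while loop does nothing when the stack top is greater than a
theorem mctPop_none (t : Int) (T : List Int) (a rp : Int) (h : a < t) :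
    mctPopLoop (t :: T) a rp = (rp, t :: T) := by
  have e : mctPopLoop (t :: T) a rp
      = if t ≤ a then mctPopLoop T a (rp + t * (match T with | [] => a | u :: _ => min u a)) else (rp, t :: T) := rfl
  rw [e, if_neg (by omega)]

-- a res difference c before the remaining iterations and the drain survives to the end
theorem mctShift_through (s' : List Int) (c r : Int) (st : List Int) :
    mctDrain ((s'.foldl mctStep (r + c, st)).2) ((s'.foldl mctStep (r + c, st)).1)
      = c + mctDrain ((s'.foldl mctStep (r, st)).2) ((s'.foldl mctStep (r, st)).1) := by
  rw [mctFoldl_shift s' (r + c) st, mctFoldl_shift s' r st]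
  simp only []
  rw [mctDrain_shift _ (r + c + (s'.foldl mctStep (0, st)).1),
      mctDrain_shift _ (r + (s'.foldl mctStep (0, st)).1)]
  ring

-- B on p ++ m :: s, m strictly below p and weakly below s: m's charge splits off
theorem alt_split (p s : List Int) (m : Int)
    (hp : ∀ x ∈ p, m < x) (hs : ∀ x ∈ s, m ≤ x) (hne : p ≠ [] ∨ s ≠ []) :
    mctFromLeafValues1_alt (p ++ m :: s) = mctCharge p s m + mctFromLeafValues1_alt (p ++ s) := by
  rcases p.eq_nil_or_concat with rfl | ⟨p', x, rfl⟩
  · cases s with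
    | nil => rcases hne with h | h <;> simp at h
    | cons a' s' =>
      have hm : m ≤ a' := hs a' (by simp)
      have h1 : (([] : List Int) ++ m :: a' :: s').foldl mctStep (0, [])
          = s'.foldl mctStep (0 + m * a', [a']) := by
        simp only [List.nil_append, List.foldl_cons]
        have e1 : mctStep (0, ([] : List Int)) m = (0, [m]) := rfl
        rw [e1]
        have e2 : mctStep (0, [m]) a' = (0 + m * a', [a']) := by
          show ((mctPopLoop [m] a' 0).1, a' :: (mctPopLoop [m] a' 0).2) = _
          rw [mctPop_skip_nil m a' 0 hm]
        rw [e2]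
      have h2 : (([] : List Int) ++ a' :: s').foldl mctStep (0, [])
          = s'.foldl mctStep (0, [a']) := by
        simp only [List.nil_append, List.foldl_cons]; rfl
      unfold mctFromLeafValues1_alt
      rw [h1, h2, mctShift_through s' (m * a') 0 [a']]
      simp [mctCharge]
  · simp only [List.concat_eq_append] at hp hne ⊢
    have hx : m < x := hp x (by simp)
    obtain ⟨T, hT⟩ := mctFoldl_snd_concat p' x (0, ([] : List Int))
    have hpush : mctStep ((p' ++ [x]).foldl mctStep (0, [])) m
        = (((p' ++ [x]).foldl mctStep (0, [])).1,
           m :: ((p' ++ [x]).foldl mctStep (0, [])).2) := by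
      show ((mctPopLoop _ m _).1, m :: (mctPopLoop _ m _).2) = _
      rw [hT, mctPop_none x T m _ hx]
    cases s with
    | nil =>
      have h1 : ((p' ++ [x]) ++ m :: ([] : List Int)).foldl mctStep (0, [])
          = (((p' ++ [x]).foldl mctStep (0, [])).1,
             m :: x :: T) := by
        rw [List.foldl_append, List.foldl_cons, List.foldl_nil, hpush, hT]
      have hc : mctCharge (p' ++ [x]) [] m = m * x := by
        simp [mctCharge]
      unfold mctFromLeafValues1_alt
      simp only [List.append_nil]
      rw [h1]
      simp only []
      have e : mctDrain (m :: x :: T) (((p' ++ [x]).foldl mctStep (0, [])).1)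
          = mctDrain (x :: T) (((p' ++ [x]).foldl mctStep (0, [])).1 + m * x) := rfl
      rw [e, mctDrain_shift (x :: T) _, hc, hT, mctDrain_shift (x :: T) ((p' ++ [x]).foldl mctStep (0, [])).1]
      ring
    | cons a' s' =>
      have hm : m ≤ a' := hs a' (by simp)
      have h2 : mctStep (((p' ++ [x]).foldl mctStep (0, [])).1, m :: x :: T) a'
          = ((mctStep (((p' ++ [x]).foldl mctStep (0, [])).1, x :: T) a').1 + m * min x a',
             (mctStep (((p' ++ [x]).foldl mctStep (0, [])).1, x :: T) a').2) := by
      -- pop m with charge m*min(x,a'), then the loop continues as if m had never been pushed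
        show ((mctPopLoop (m :: x :: T) a' _).1, a' :: (mctPopLoop (m :: x :: T) a' _).2) = _
        rw [mctPop_skip_cons x T m a' _ hm]
        rfl
      have h1 : ((p' ++ [x]) ++ m :: a' :: s').foldl mctStep (0, [])
          = s'.foldl mctStep
              ((mctStep ((p' ++ [x]).foldl mctStep (0, [])) a').1 + m * min x a',
               (mctStep ((p' ++ [x]).foldl mctStep (0, [])) a').2) := by
        rw [List.foldl_append, List.foldl_cons, List.foldl_cons, hpush, hT, h2, ← hT]
      have h3 : ((p' ++ [x]) ++ a' :: s').foldl mctStep (0, [])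
          = s'.foldl mctStep (mctStep ((p' ++ [x]).foldl mctStep (0, [])) a') := by
        rw [List.foldl_append, List.foldl_cons]
      unfold mctFromLeafValues1_alt
      rw [h1, h3,
          mctShift_through s' (m * min x a') (mctStep ((p' ++ [x]).foldl mctStep (0, [])) a').1
            (mctStep ((p' ++ [x]).foldl mctStep (0, [])) a').2]
      have hc : mctCharge (p' ++ [x]) (a' :: s') m = m * min x a' := by
        simp [mctCharge]
      rw [hc]

-- A's pyGet?-phrased charge equals mctCharge
theorem chargeA_eq (p s : List Int) (m : Int) (h : 1 < (p ++ m :: s).length) :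
    (if 0 < p.length ∧ (p.length : Int) < ((p ++ m :: s).length : Int) - 1 then
       min ((PySem.List.pyGet? (p ++ m :: s) ((p.length : Int) - 1)).getD 0)
           ((PySem.List.pyGet? (p ++ m :: s) ((p.length : Int) + 1)).getD 0) * m
     else (if p.length = 0 then (PySem.List.pyGet? (p ++ m :: s) 1).getD 0
           else (PySem.List.pyGet? (p ++ m :: s) (-2)).getD 0) * m)
    = mctCharge p s m := by
  rcases p.eq_nil_or_concat with rfl | ⟨p', x, rfl⟩
  · cases s with
    | nil => simp at h
    | cons a' s' =>
      rw [if_neg (by simp), if_pos (by simp)]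
      have e : PySem.List.pyGet? (([] : List Int) ++ m :: a' :: s') 1 = some a' := by
        rw [PySem.List.pyGet?_of_nonneg _ (by norm_num)]
        simp
      rw [e]
      simp [mctCharge, mul_comm]
  · simp only [List.concat_eq_append]
    cases s with
    | nil =>
      have hlen : ((p' ++ [x]) ++ m :: ([] : List Int)).length = p'.length + 2 := by simp
      rw [if_neg (by push_cast [List.length_append, List.length_cons, List.length_nil]; omega), if_neg (by simp)]
      have e : PySem.List.pyGet? ((p' ++ [x]) ++ m :: ([] : List Int)) (-2)
          = some x := by
        rw [PySem.List.pyGet?_neg_ofNat _ 2 (by omega) (by rw [hlen]; omega), hlen]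
        have : p'.length + 2 - 2 = p'.length := by omega
        rw [this, show (p' ++ [x]) ++ m :: ([] : List Int) = p' ++ (x :: [m]) by simp]
        simp
      rw [e]
      simp [mctCharge, mul_comm]
    | cons a' s' =>
      have hlen : ((p' ++ [x]) ++ m :: a' :: s').length = p'.length + 3 + s'.length := by
        simp; omega
      rw [if_pos ⟨by simp, by push_cast [List.length_append, List.length_cons, List.length_nil]; omega⟩]
      have e1 : PySem.List.pyGet? ((p' ++ [x]) ++ m :: a' :: s') (((p' ++ [x]).length : Int) - 1)
          = some x := by
        have hc : (((p' ++ [x]).length : Int) - 1) = ((p'.length : Nat) : Int) := by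
          push_cast [List.length_append, List.length_cons, List.length_nil]; ring
        rw [hc, PySem.List.pyGet?_natCast,
            show (p' ++ [x]) ++ m :: a' :: s' = p' ++ (x :: m :: a' :: s') by simp]
        simp
      have e2 : PySem.List.pyGet? ((p' ++ [x]) ++ m :: a' :: s') (((p' ++ [x]).length : Int) + 1)
          = some a' := by
        have hc : (((p' ++ [x]).length : Int) + 1) = ((((p' ++ [x]) ++ [m]).length : Nat) : Int) := by
          push_cast [List.length_append, List.length_cons, List.length_nil]; ring
        rw [hc, PySem.List.pyGet?_natCast,
            show (p' ++ [x]) ++ m :: a' :: s' = ((p' ++ [x]) ++ [m]) ++ (a' :: s') by simp]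
        rw [List.getElem?_append_right (by simp)]
        simp
      rw [e1, e2]
      simp [mctCharge, mul_comm]

theorem mctALoop_eq_alt : ∀ (n : Nat) (arr : List Int), arr.length ≤ n →
    ∀ r : Int, mctALoop arr r = r + mctFromLeafValues1_alt arr := by
  intro n
  induction n with
  | zero =>
    intro arr h r
    have : arr = [] := List.length_eq_zero_iff.mp (by omega)
    subst this
    rw [mctALoop_stop _ _ (by simp)]
    show r = r + 0
    ring
  | succ n ih =>
    intro arr h r
    by_cases hlen : 1 < arr.length
    · have hne : arr ≠ [] := by intro e; subst e; simp at hlen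
      obtain ⟨m, hm⟩ : ∃ m, PySem.List.min? arr (fun x => x) = some m := by
        cases e : PySem.List.min? arr (fun x => x) with
        | none => exact absurd ((PySem.List.min?_eq_none_iff arr (fun x => x)).mp e) hne
        | some m => exact ⟨m, rfl⟩
      have hmem : m ∈ arr := PySem.List.min?_mem hm
      obtain ⟨idx, hi⟩ : ∃ idx, PySem.List.index? arr m = some idx := by
        cases e : PySem.List.index? arr m with
        | none => exact absurd ((PySem.List.index?_eq_none_iff arr m).mp e) (by simp; exact hmem)
        | some k => exact ⟨k, rfl⟩
      obtain ⟨p, s, harr, hplen, hnotin⟩ := (PySem.List.index?_eq_some_iff arr m idx).mp hi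
      have hmin : ∀ y ∈ arr, m ≤ y := PySem.List.min?_isMin hm
      have hidx : idx < arr.length := by subst harr; rw [← hplen]; simp
      have hget : arr[idx]'hidx = m := by
        obtain ⟨hk, hv, _⟩ := PySem.List.getElem_of_index?_eq_some hi
        exact hv
      have herase : arr.eraseIdx idx = p ++ s := by
        subst harr; rw [← hplen]; simp [List.eraseIdx_append_of_length_le]
      have hpop : PySem.List.pop? arr (idx : Int) = some (m, p ++ s) := by
        have hpop0 := PySem.List.pop?_natCast arr idx hidx
        simp only [hget, herase] at hpop0
        exact hpop0
      rw [mctALoop_round arr (p ++ s) m m idx r hlen hm hi hpop]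
      have hcharge :
          (if 0 < idx ∧ (idx : Int) < (arr.length : Int) - 1 then
             min ((PySem.List.pyGet? arr ((idx : Int) - 1)).getD 0)
                 ((PySem.List.pyGet? arr ((idx : Int) + 1)).getD 0) * m
           else (if idx = 0 then (PySem.List.pyGet? arr 1).getD 0
                 else (PySem.List.pyGet? arr (-2)).getD 0) * m) = mctCharge p s m := by
        subst harr; subst hplen
        exact chargeA_eq p s m hlen
      rw [hcharge]
      have hrec : (p ++ s).length ≤ n := by
        subst harr; simp at h ⊢; omega
      rw [ih (p ++ s) hrec]
      have hp' : ∀ x ∈ p, m < x := by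
        intro x hx
        refine lt_of_le_of_ne (hmin x ?_) ?_
        · subst harr; simp [hx]
        · intro e; exact hnotin (e ▸ hx)
      have hs' : ∀ x ∈ s, m ≤ x := by
        intro x hx; exact hmin x (by subst harr; simp [hx])
      have hne2 : p ≠ [] ∨ s ≠ [] := by
        by_contra hc
        push Not at hc
        obtain ⟨h1, h2⟩ := hc
        subst harr; subst h1; subst h2; simp at hlen
      have := alt_split p s m hp' hs' hne2
      subst harr
      rw [this]
      ring
    · rw [mctALoop_stop arr r hlen]
      match arr, hlen with
      | [], _ => show r = r + 0; ring
      | [a], _ =>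
        show r = r + mctFromLeafValues1_alt [a]
        norm_num [mctFromLeafValues1_alt, mctStep, mctPopLoop, mctDrain]
      | a :: b :: t, hlen => exact absurd (by simp) hlen

-- ===== VERDICT (by name: the statement is the Claim_ definition above) =====
theorem mctFromLeafValues1_spec : Claim_equal_mctFromLeafValues1 := by
  intro arr _
  unfold Spec_mctFromLeafValues1 mctFromLeafValues1
  simpa using mctALoop_eq_alt arr.length arr le_rfl 0
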